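-- pv_equiv track=rewrite | github.com/mitrov96/AdventOfCode2022 | day_15.py | compute_part2
-- ===== SOURCE A (Python) =====
-- def compute_part2(data, max_xy):
--     sensors = set()
--     beacons = set()
--     for line in data:
--         sensor, beacon = line
--         dist = abs(sensor[0] - beacon[0]) + abs(sensor[1] - beacon[1])
--         sensors.add((sensor, dist))
--         beacons.add(beacon)
--
--     for line in data:
--         sensor, beacon = line
--         dist = abs(sensor[0] - beacon[0]) + abs(sensor[1] - beacon[1])
--         top_most_y = sensor[1] + dist - 1
--         bottom_most_y = sensor[1] - dist - 1
--         for i in range(dist):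
--             for x, y in [
--                 (sensor[0] + i, top_most_y - i),
--                 (sensor[0] + i, bottom_most_y + i),
--                 (sensor[0] - i, top_most_y - i),
--                 (sensor[0] - i, bottom_most_y + i),
--             ]:
--                 if x < 0 or x > max_xy or y < 0 or y > max_xy:
--                     continue
--                 if (x, y) in beacons:
--                     continue
--                 found = False
--                 for s2, s2_dist in sensors:
--                     d = abs(s2[0] - x) + abs(s2[1] - y)
--                     if d <= s2_dist:
--                         found = True
--                         break
--                 if not found:
--                     return x * 4000000 + y
-- ===== SOURCE B (Python) =====
-- def first_gap(intervals, start, end):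
--     # Minimal i in [start, end] lying in no interval of `intervals`; None if covered.
--     if start > end:
--         return None
--     cur = start
--     pending = list(intervals)
--     while True:
--         hit = None
--         for idx, (lo, hi) in enumerate(pending):
--             if lo <= cur <= hi:
--                 hit = idx
--                 break
--         if hit is None:
--             return cur
--         cur = pending.pop(hit)[1] + 1
--         if cur > end:
--             return None
--
--
-- def compute_part2(data, max_xy):
--     # Interval arithmetic on the two lower boundary diagonals of each sensor:
--     # each sensor covers a contiguous interval of the diagonal parameter i, so the
--     # first uncovered candidate is found by interval jumping, not point-by-point.
--     circles = [(sx, sy, abs(sx - bx) + abs(sy - by)) for (sx, sy), (bx, by) in data]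
--     for sx, sy, dist in circles:
--         bot = sy - dist - 1
--         best = None  # (i, x) — right diagonal scanned first wins ties
--         for sign in (1, -1):
--             # point(i) = (sx + sign*i, bot + i), i in [start, end] keeps it in the box
--             if sign == 1:
--                 start = max(0, -sx, -bot)
--                 end = min(dist - 1, max_xy - sx, max_xy - bot)
--             else:
--                 start = max(0, sx - max_xy, -bot)
--                 end = min(dist - 1, sx, max_xy - bot)
--             intervals = []
--             for cx, cy, d in circles:
--                 a = sign * (cx - sx)
--                 b = cy - bot
--                 if abs(a - b) <= d:
--                     intervals.append(((a + b - d + 1) // 2, (a + b + d) // 2))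
--             i = first_gap(intervals, start, end)
--             if i is not None and (best is None or i < best[0]):
--                 best = (i, sx + sign * i)
--         if best is not None:
--             return best[1] * 4000000 + (bot + best[0])
--     return None
-- ===== Notes on version B (the rewrite author's own statement) =====
-- stated objective: faster
-- what changed: B replaces A's point-by-point walk over each sensor's perimeter (each point checked against every sensor) by interval arithmetic: on each of the two lower boundary diagonals every sensor covers one contiguous interval of the diagonal parameter, so B computes those intervals in closed form and finds the first uncovered parameter by interval jumping (pop the interval containing the cursor, jump past it), never enumerating points.
import Mathlib
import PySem

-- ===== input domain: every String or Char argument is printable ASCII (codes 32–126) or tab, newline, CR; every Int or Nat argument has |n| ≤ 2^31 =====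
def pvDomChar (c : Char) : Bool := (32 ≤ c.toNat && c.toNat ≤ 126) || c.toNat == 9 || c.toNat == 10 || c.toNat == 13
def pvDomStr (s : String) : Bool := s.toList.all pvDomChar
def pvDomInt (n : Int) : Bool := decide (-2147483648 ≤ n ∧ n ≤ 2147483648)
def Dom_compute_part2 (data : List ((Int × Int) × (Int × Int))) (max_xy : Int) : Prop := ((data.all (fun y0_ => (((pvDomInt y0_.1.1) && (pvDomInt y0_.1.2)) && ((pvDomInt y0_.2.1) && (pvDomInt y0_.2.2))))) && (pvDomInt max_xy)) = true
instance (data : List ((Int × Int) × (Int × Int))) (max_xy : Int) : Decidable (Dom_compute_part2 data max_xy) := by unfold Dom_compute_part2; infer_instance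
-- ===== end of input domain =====

-- B replaces A's point-by-point perimeter walk by interval arithmetic on each sensor's two
-- lower boundary diagonals (each sensor covers one contiguous i-interval of a diagonal, so
-- the first uncovered point is found by interval jumping); equivalence of the return value is proved.

-- ===== PORT A =====
-- 'for s2, s2_dist in sensors: … break' — an any-style scan
def pvFound (sensors : List ((Int × Int) × Int)) (x y : Int) : Bool :=
  match sensors with
  | [] => false
  | sd :: rest =>
    if |sd.1.1 - x| + |sd.1.2 - y| ≤ sd.2 then true
    else pvFound rest x y

-- the body 'for x, y in [ … ]:' with its three 'continue's and the return
def pvCandLoop (sensors : PySem.Set ((Int × Int) × Int)) (beacons : PySem.Set (Int × Int))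
    (max_xy : Int) : List (Int × Int) → Option Int
  | [] => none
  | c :: rest =>
    if c.1 < 0 ∨ c.1 > max_xy ∨ c.2 < 0 ∨ c.2 > max_xy then
      pvCandLoop sensors beacons max_xy rest
    else if PySem.Set.contains beacons c then
      pvCandLoop sensors beacons max_xy rest
    else if pvFound sensors c.1 c.2 then
      pvCandLoop sensors beacons max_xy rest
    else some (c.1 * 4000000 + c.2)

-- 'for i in range(dist):'
def pvILoopA (sensors : PySem.Set ((Int × Int) × Int)) (beacons : PySem.Set (Int × Int))
    (max_xy sx top bot : Int) : List Int → Option Int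
  | [] => none
  | i :: rest =>
    match pvCandLoop sensors beacons max_xy
        [(sx + i, top - i), (sx + i, bot + i), (sx - i, top - i), (sx - i, bot + i)] with
    | some r => some r
    | none => pvILoopA sensors beacons max_xy sx top bot rest

-- the second 'for line in data:'
def pvOuterA (sensors : PySem.Set ((Int × Int) × Int)) (beacons : PySem.Set (Int × Int))
    (max_xy : Int) : List ((Int × Int) × (Int × Int)) → Option Int
  | [] => none
  | line :: rest =>
    let dist := |line.1.1 - line.2.1| + |line.1.2 - line.2.2|
    match pvILoopA sensors beacons max_xy line.1.1 (line.1.2 + dist - 1) (line.1.2 - dist - 1)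
        (PySem.List.pyRange 0 dist 1) with
    | some r => some r
    | none => pvOuterA sensors beacons max_xy rest

def compute_part2 (data : List ((Int × Int) × (Int × Int))) (max_xy : Int) : Option Int :=
  -- first loop: build the 'sensors' and 'beacons' sets
  let sb := data.foldl
    (fun (acc : PySem.Set ((Int × Int) × Int) × PySem.Set (Int × Int)) line =>
      (PySem.Set.add acc.1 (line.1, |line.1.1 - line.2.1| + |line.1.2 - line.2.2|),
       PySem.Set.add acc.2 line.2))
    (PySem.Set.empty, PySem.Set.empty)
  pvOuterA sb.1 sb.2 max_xy data

-- ===== PORT B =====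
def pvDist (l : (Int × Int) × (Int × Int)) : Int :=
  |l.1.1 - l.2.1| + |l.1.2 - l.2.2|

def pvCircle (l : (Int × Int) × (Int × Int)) : Int × Int × Int :=
  (l.1.1, l.1.2, pvDist l)

-- 'for idx, (lo, hi) in enumerate(pending): … pending.pop(hit)': first interval containing
-- cur, returned with the remaining list
def pvPopCover (pending : List (Int × Int)) (cur : Int) : Option (Int × List (Int × Int)) :=
  match pending with
  | [] => none
  | iv :: rest =>
    if iv.1 ≤ cur ∧ cur ≤ iv.2 then some (iv.2, rest)
    else
      match pvPopCover rest cur with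
      | none => none
      | some (hi, rest') => some (hi, iv :: rest')

lemma pvPopCover_length : ∀ (P : List (Int × Int)) (cur hi : Int) (rest : List (Int × Int)),
    pvPopCover P cur = some (hi, rest) → rest.length < P.length := by
  intro P
  induction P with
  | nil => intro cur hi rest h; simp [pvPopCover] at h
  | cons iv tl ih =>
    intro cur hi rest h
    simp only [pvPopCover] at h
    split_ifs at h with hc
    · cases h; simp
    · cases htl : pvPopCover tl cur with
      | none => rw [htl] at h; cases h
      | some p =>
        rw [htl] at h
        cases h
        have := ih cur p.1 p.2 (by rw [htl])
        simp; omega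

-- the 'while True:' of first_gap
def pvGapLoop (pending : List (Int × Int)) (cur endI : Int) : Option Int :=
  match h : pvPopCover pending cur with
  | none => some cur
  | some (hi, rest) =>
    if hi + 1 > endI then none else pvGapLoop rest (hi + 1) endI
termination_by pending.length
decreasing_by exact pvPopCover_length pending cur hi rest h

def pvFirstGap (intervals : List (Int × Int)) (start endI : Int) : Option Int :=
  if start > endI then none else pvGapLoop intervals start endI

-- one diagonal of one sensor: bounds + covered intervals + first_gap
def pvDiagGap (circles : List (Int × Int × Int)) (max_xy sx bot dist sign : Int) : Option Int :=
  let start := if sign = 1 then max (max 0 (-sx)) (-bot) else max (max 0 (sx - max_xy)) (-bot)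
  let endI := if sign = 1 then min (min (dist - 1) (max_xy - sx)) (max_xy - bot)
              else min (min (dist - 1) sx) (max_xy - bot)
  let intervals := circles.foldl (fun acc c =>
      let a := sign * (c.1 - sx)
      let b := c.2.1 - bot
      if |a - b| ≤ c.2.2 then
        acc ++ [(PySem.Int.floordiv (a + b - c.2.2 + 1) 2, PySem.Int.floordiv (a + b + c.2.2) 2)]
      else acc) []
  pvFirstGap intervals start endI

-- 'if i is not None and (best is None or i < best[0]): best = (i, sx + sign*i)'
def pvBestStep (circles : List (Int × Int × Int)) (max_xy sx bot dist : Int)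
    (best : Option (Int × Int)) (sign : Int) : Option (Int × Int) :=
  match pvDiagGap circles max_xy sx bot dist sign with
  | none => best
  | some i =>
    match best with
    | none => some (i, sx + sign * i)
    | some b => if i < b.1 then some (i, sx + sign * i) else best

-- 'for sign in (1, -1):'
def pvBest (circles : List (Int × Int × Int)) (max_xy sx bot dist : Int) : Option (Int × Int) :=
  [(1 : Int), -1].foldl (pvBestStep circles max_xy sx bot dist) none

-- 'for sx, sy, dist in circles:'
def pvOuterB (circles : List (Int × Int × Int)) (max_xy : Int) :
    List (Int × Int × Int) → Option Int
  | [] => none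
  | c :: rest =>
    let bot := c.2.1 - c.2.2 - 1
    match pvBest circles max_xy c.1 bot c.2.2 with
    | some b => some (b.2 * 4000000 + (bot + b.1))
    | none => pvOuterB circles max_xy rest

def compute_part2_alt (data : List ((Int × Int) × (Int × Int))) (max_xy : Int) : Option Int :=
  let circles := data.map pvCircle
  pvOuterB circles max_xy circles

-- ===== PRECONDITION & SPEC =====
def Spec_compute_part2 (data : List ((Int × Int) × (Int × Int))) (max_xy : Int) (out : Option Int) : Prop := out = compute_part2_alt data max_xy
instance (data : List ((Int × Int) × (Int × Int))) (max_xy : Int) (out : Option Int) : Decidable (Spec_compute_part2 data max_xy out) := by unfold Spec_compute_part2; infer_instance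

-- ===== CLAIM (what is proved, stated in full; the proofs are below) =====
def Claim_equal_compute_part2 : Prop := ∀ (data : List ((Int × Int) × (Int × Int))) (max_xy : Int), Dom_compute_part2 data max_xy → Spec_compute_part2 data max_xy (compute_part2 data max_xy)

-- ===== LEMMAS AND PROOFS =====

-- '(x, y) is within Manhattan distance of some sensor of data'
def pvCov (data : List ((Int × Int) × (Int × Int))) (x y : Int) : Bool :=
  data.any (fun l => |l.1.1 - x| + |l.1.2 - y| ≤ pvDist l)

-- 'i lies in some interval of ivs'
def pvCovI (ivs : List (Int × Int)) (i : Int) : Prop :=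
  ∃ iv ∈ ivs, iv.1 ≤ i ∧ i ≤ iv.2

-- clean form of A's per-line scan (tops and beacon test removed; proof-side only)
def pvScan (data : List ((Int × Int) × (Int × Int))) (max_xy sx bot : Int) :
    List Int → Option Int
  | [] => none
  | i :: rest =>
    if 0 ≤ sx + i ∧ sx + i ≤ max_xy ∧ 0 ≤ bot + i ∧ bot + i ≤ max_xy ∧
        pvCov data (sx + i) (bot + i) = false then
      some ((sx + i) * 4000000 + (bot + i))
    else if 0 ≤ sx - i ∧ sx - i ≤ max_xy ∧ 0 ≤ bot + i ∧ bot + i ≤ max_xy ∧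
        pvCov data (sx - i) (bot + i) = false then
      some ((sx - i) * 4000000 + (bot + i))
    else pvScan data max_xy sx bot rest

lemma pvCov_iff (data : List ((Int × Int) × (Int × Int))) (x y : Int) :
    pvCov data x y = true ↔ ∃ l ∈ data, |l.1.1 - x| + |l.1.2 - y| ≤ pvDist l := by
  simp [pvCov]

lemma pvFound_iff (L : List ((Int × Int) × Int)) (x y : Int) :
    pvFound L x y = true ↔ ∃ sd ∈ L, |sd.1.1 - x| + |sd.1.2 - y| ≤ sd.2 := by
  induction L with
  | nil => simp [pvFound]
  | cons sd rest ih =>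
    simp only [pvFound]
    split_ifs with h
    · simp [h]
    · simp [ih, h]

-- contents of the two sets built by the first loop
lemma pvSets_spec (data : List ((Int × Int) × (Int × Int))) :
    (∀ z, z ∈ (data.foldl
        (fun (acc : PySem.Set ((Int × Int) × Int) × PySem.Set (Int × Int)) line =>
          (PySem.Set.add acc.1 (line.1, |line.1.1 - line.2.1| + |line.1.2 - line.2.2|),
           PySem.Set.add acc.2 line.2))
        (PySem.Set.empty, PySem.Set.empty)).1 ↔ ∃ l ∈ data, z = (l.1, pvDist l)) ∧
    (∀ p, p ∈ (data.foldl
        (fun (acc : PySem.Set ((Int × Int) × Int) × PySem.Set (Int × Int)) line =>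
          (PySem.Set.add acc.1 (line.1, |line.1.1 - line.2.1| + |line.1.2 - line.2.2|),
           PySem.Set.add acc.2 line.2))
        (PySem.Set.empty, PySem.Set.empty)).2 ↔ ∃ l ∈ data, p = l.2) := by
  have h : ∀ (s : PySem.Set ((Int × Int) × Int)) (b : PySem.Set (Int × Int)),
      (data.foldl
        (fun (acc : PySem.Set ((Int × Int) × Int) × PySem.Set (Int × Int)) line =>
          (PySem.Set.add acc.1 (line.1, |line.1.1 - line.2.1| + |line.1.2 - line.2.2|),
           PySem.Set.add acc.2 line.2)) (s, b)) =
      (data.foldl (fun s line => PySem.Set.add s (line.1, pvDist line)) s,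
       data.foldl (fun b line => PySem.Set.add b line.2) b) := by
    induction data with
    | nil => intro s b; rfl
    | cons l rest ih => intro s b; simp only [List.foldl_cons, ih, pvDist]
  rw [h]
  constructor
  · intro z
    simpa [pvDist] using PySem.Set.mem_foldl_add (l := data) (f := fun l => (l.1, pvDist l))
      (s := PySem.Set.empty) (y := z)
  · intro p
    simpa using PySem.Set.mem_foldl_add (l := data) (f := fun l => l.2)
      (s := PySem.Set.empty) (y := p)

-- one candidate step of A's inner list-loop, in canonical form
lemma candStep_eq (data : List ((Int × Int) × (Int × Int)))
    (S : PySem.Set ((Int × Int) × Int)) (B : PySem.Set (Int × Int))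
    (hS : ∀ x y, pvFound S x y = pvCov data x y)
    (hB : ∀ p : Int × Int, PySem.Set.contains B p = true → pvCov data p.1 p.2 = true)
    (max_xy : Int) (c : Int × Int) (rest : List (Int × Int)) :
    pvCandLoop S B max_xy (c :: rest) =
      if 0 ≤ c.1 ∧ c.1 ≤ max_xy ∧ 0 ≤ c.2 ∧ c.2 ≤ max_xy ∧ pvCov data c.1 c.2 = false then
        some (c.1 * 4000000 + c.2)
      else pvCandLoop S B max_xy rest := by
  simp only [pvCandLoop]
  by_cases h1 : c.1 < 0 ∨ c.1 > max_xy ∨ c.2 < 0 ∨ c.2 > max_xy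
  · rw [if_pos h1, if_neg]
    rintro ⟨ha, hb, hc, hd, -⟩; omega
  · rw [if_neg h1]
    by_cases h2 : PySem.Set.contains B c = true
    · rw [if_pos h2, if_neg]
      rintro ⟨-, -, -, -, hnc⟩
      rw [hB c h2] at hnc; exact Bool.noConfusion hnc
    · rw [if_neg h2]
      by_cases h3 : pvFound S c.1 c.2 = true
      · rw [if_pos h3, if_neg]
        rintro ⟨-, -, -, -, hnc⟩
        rw [hS c.1 c.2] at h3
        rw [h3] at hnc; exact Bool.noConfusion hnc
      · rw [if_neg h3, if_pos]
        rw [Bool.not_eq_true, hS c.1 c.2] at h3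
        exact ⟨by omega, by omega, by omega, by omega, h3⟩

-- the two 'top' candidates of A are always inside their own sensor's range
lemma top_covered (data : List ((Int × Int) × (Int × Int)))
    (l : (Int × Int) × (Int × Int)) (hl : l ∈ data) (i : Int)
    (hi : 0 ≤ i) (hid : i < pvDist l) (x : Int)
    (hx : x = l.1.1 + i ∨ x = l.1.1 - i) :
    pvCov data x (l.1.2 + pvDist l - 1 - i) = true := by
  rw [pvCov_iff]
  refine ⟨l, hl, ?_⟩
  have hd : |l.1.2 - (l.1.2 + pvDist l - 1 - i)| = pvDist l - 1 - i := by
    rw [show l.1.2 - (l.1.2 + pvDist l - 1 - i) = -(pvDist l - 1 - i) by ring, abs_neg,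
      abs_of_nonneg (by omega)]
  rcases hx with rfl | rfl
  · rw [show l.1.1 - (l.1.1 + i) = -i by ring, abs_neg, abs_of_nonneg hi, hd]; omega
  · rw [show l.1.1 - (l.1.1 - i) = i by ring, abs_of_nonneg hi, hd]; omega

-- A's per-line i-loop reduces to the clean scan (tops are covered, beacon test is redundant)
lemma iloopA_eq_scan (data : List ((Int × Int) × (Int × Int)))
    (S : PySem.Set ((Int × Int) × Int)) (B : PySem.Set (Int × Int))
    (hS : ∀ x y, pvFound S x y = pvCov data x y)
    (hB : ∀ p : Int × Int, PySem.Set.contains B p = true → pvCov data p.1 p.2 = true)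
    (max_xy : Int) (l : (Int × Int) × (Int × Int)) (hl : l ∈ data) :
    ∀ I : List Int, (∀ i ∈ I, 0 ≤ i ∧ i < pvDist l) →
      pvILoopA S B max_xy l.1.1 (l.1.2 + pvDist l - 1) (l.1.2 - pvDist l - 1) I =
      pvScan data max_xy l.1.1 (l.1.2 - pvDist l - 1) I := by
  intro I
  induction I with
  | nil => intro _; rfl
  | cons i rest ih =>
    intro hmem
    obtain ⟨hi, hid⟩ := hmem i (by simp)
    have hrest : ∀ j ∈ rest, 0 ≤ j ∧ j < pvDist l := fun j hj => hmem j (by simp [hj])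
    simp only [pvILoopA, pvScan]
    rw [candStep_eq data S B hS hB, candStep_eq data S B hS hB, candStep_eq data S B hS hB,
        candStep_eq data S B hS hB]
    have t1 : pvCov data (l.1.1 + i) (l.1.2 + pvDist l - 1 - i) = true :=
      top_covered data l hl i hi hid _ (Or.inl rfl)
    have t2 : pvCov data (l.1.1 - i) (l.1.2 + pvDist l - 1 - i) = true :=
      top_covered data l hl i hi hid _ (Or.inr rfl)
    simp only [t1, t2, Bool.true_eq_false, and_false, if_false]
    split_ifs with h1 h2 <;> simp only [pvCandLoop]
    exact ih hrest

-- ===== pvPopCover / pvGapLoop specs =====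

lemma pvPopCover_none : ∀ (P : List (Int × Int)) (cur : Int), pvPopCover P cur = none →
    ¬ pvCovI P cur := by
  intro P
  induction P with
  | nil => intro cur h; rintro ⟨iv, hiv, -⟩; simp at hiv
  | cons iv tl ih =>
    intro cur h
    simp only [pvPopCover] at h
    split_ifs at h with hc
    · cases htl : pvPopCover tl cur with
      | none =>
        rintro ⟨jv, hjv, hj1, hj2⟩
        rcases List.mem_cons.mp hjv with rfl | hjv'
        · exact hc ⟨hj1, hj2⟩
        · exact ih cur htl ⟨jv, hjv', hj1, hj2⟩
      | some p => rw [htl] at h; cases h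

lemma pvPopCover_some : ∀ (P : List (Int × Int)) (cur hi : Int) (rest : List (Int × Int)),
    pvPopCover P cur = some (hi, rest) →
    ∃ lo, lo ≤ cur ∧ cur ≤ hi ∧ P.Perm ((lo, hi) :: rest) := by
  intro P
  induction P with
  | nil => intro cur hi rest h; simp [pvPopCover] at h
  | cons iv tl ih =>
    intro cur hi rest h
    simp only [pvPopCover] at h
    split_ifs at h with hc
    · cases h
      exact ⟨iv.1, hc.1, hc.2, List.Perm.refl _⟩
    · cases htl : pvPopCover tl cur with
      | none => rw [htl] at h; cases h
      | some p =>
        rw [htl] at h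
        cases h
        obtain ⟨lo, h1, h2, hperm⟩ := ih cur p.1 p.2 (by rw [htl])
        refine ⟨lo, h1, h2, ?_⟩
        exact (hperm.cons iv).trans (List.Perm.swap _ _ _)

lemma pvCovI_perm {P Q : List (Int × Int)} (h : P.Perm Q) (i : Int) :
    pvCovI P i ↔ pvCovI Q i := by
  unfold pvCovI
  constructor <;> rintro ⟨iv, hiv, h1, h2⟩
  · exact ⟨iv, h.mem_iff.mp hiv, h1, h2⟩
  · exact ⟨iv, h.mem_iff.mpr hiv, h1, h2⟩

lemma pvGapLoop_eq_none {P : List (Int × Int)} {cur : Int} (endI : Int)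
    (h : pvPopCover P cur = none) : pvGapLoop P cur endI = some cur := by
  rw [pvGapLoop]
  split
  · rfl
  · next hi rest h' => rw [h'] at h; cases h

lemma pvGapLoop_eq_some {P : List (Int × Int)} {cur hi : Int} {rest : List (Int × Int)}
    (endI : Int) (h : pvPopCover P cur = some (hi, rest)) :
    pvGapLoop P cur endI = if hi + 1 > endI then none else pvGapLoop rest (hi + 1) endI := by
  rw [pvGapLoop]
  split
  · next h' => rw [h'] at h; cases h
  · next hi' rest' h' =>
      rw [h'] at h
      cases h
      rfl

lemma pvGapLoop_spec : ∀ (n : ℕ) (P : List (Int × Int)) (cur endI : Int), P.length = n →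
    cur ≤ endI →
    (pvGapLoop P cur endI = none → ∀ i, cur ≤ i → i ≤ endI → pvCovI P i) ∧
    (∀ j, pvGapLoop P cur endI = some j →
      cur ≤ j ∧ j ≤ endI ∧ ¬ pvCovI P j ∧ ∀ i, cur ≤ i → i < j → pvCovI P i) := by
  intro n
  induction n using Nat.strong_induction_on with
  | _ n ih =>
    intro P cur endI hlen hce
    cases hpc : pvPopCover P cur with
    | none =>
      rw [pvGapLoop_eq_none endI hpc]
      refine ⟨(by intro h; cases h), ?_⟩
      intro j hj
      cases hj
      exact ⟨le_refl _, hce, pvPopCover_none P cur hpc, by intro i h1 h2; omega⟩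
    | some pr =>
      obtain ⟨hi, rest⟩ := pr
      rw [pvGapLoop_eq_some endI hpc]
      obtain ⟨lo, hlo, hcurhi, hperm⟩ := pvPopCover_some P cur hi rest hpc
      have hcov_iff : ∀ i, pvCovI P i ↔ ((lo ≤ i ∧ i ≤ hi) ∨ pvCovI rest i) := by
        intro i
        rw [pvCovI_perm hperm]
        unfold pvCovI
        simp only [List.mem_cons]
        constructor
        · rintro ⟨iv, (rfl | hm), h1, h2⟩
          · exact Or.inl ⟨h1, h2⟩
          · exact Or.inr ⟨iv, hm, h1, h2⟩
        · rintro (⟨h1, h2⟩ | ⟨iv, hm, h1, h2⟩)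
          · exact ⟨(lo, hi), Or.inl rfl, h1, h2⟩
          · exact ⟨iv, Or.inr hm, h1, h2⟩
      have hlrest : rest.length < n := by
        have := pvPopCover_length P cur hi rest hpc; omega
      by_cases hgt : hi + 1 > endI
      · rw [if_pos hgt]
        refine ⟨?_, by intro j hj; cases hj⟩
        intro _ i h1 h2
        exact (hcov_iff i).mpr (Or.inl ⟨by omega, by omega⟩)
      · rw [if_neg hgt]
        obtain ⟨hnone, hsome⟩ := ih rest.length hlrest rest (hi + 1) endI rfl (by omega)
        constructor
        · intro h i h1 h2
          by_cases hih : i ≤ hi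
          · exact (hcov_iff i).mpr (Or.inl ⟨by omega, hih⟩)
          · exact (hcov_iff i).mpr (Or.inr (hnone h i (by omega) h2))
        · intro j hj
          obtain ⟨j1, j2, j3, j4⟩ := hsome j hj
          refine ⟨by omega, j2, ?_, ?_⟩
          · rw [hcov_iff]
            rintro (⟨-, hle⟩ | hr)
            · omega
            · exact j3 hr
          · intro i h1 h2
            by_cases hih : i ≤ hi
            · exact (hcov_iff i).mpr (Or.inl ⟨by omega, hih⟩)
            · exact (hcov_iff i).mpr (Or.inr (j4 i (by omega) h2))

lemma pvFirstGap_none (ivs : List (Int × Int)) (start endI : Int)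
    (h : pvFirstGap ivs start endI = none) :
    ∀ i, start ≤ i → i ≤ endI → pvCovI ivs i := by
  unfold pvFirstGap at h
  split_ifs at h with hgt
  · intro i h1 h2; omega
  · exact (pvGapLoop_spec ivs.length ivs start endI rfl (by omega)).1 h

lemma pvFirstGap_some (ivs : List (Int × Int)) (start endI j : Int)
    (h : pvFirstGap ivs start endI = some j) :
    start ≤ j ∧ j ≤ endI ∧ ¬ pvCovI ivs j ∧ ∀ i, start ≤ i → i < j → pvCovI ivs i := by
  unfold pvFirstGap at h
  split_ifs at h with hgt
  exact (pvGapLoop_spec ivs.length ivs start endI rfl (by omega)).2 j h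

-- ===== the interval construction covers exactly what the sensors cover =====

lemma foldl_append_ite {α β : Type} (p : α → Prop) [DecidablePred p] (f : α → β) :
    ∀ (l : List α) (acc : List β),
      l.foldl (fun acc c => if p c then acc ++ [f c] else acc) acc =
        acc ++ (l.filter (fun c => decide (p c))).map f := by
  intro l
  induction l with
  | nil => simp
  | cons c rest ih =>
    intro acc
    simp only [List.foldl_cons, List.filter_cons]
    by_cases hc : p c
    · simp [hc, ih]
    · simp [hc, ih]

lemma interval_arith (a b d i : Int) :
    (PySem.Int.floordiv (a + b - d + 1) 2 ≤ i ∧ i ≤ PySem.Int.floordiv (a + b + d) 2 ∧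
      |a - b| ≤ d) ↔ |a - i| + |b - i| ≤ d := by
  rw [PySem.Int.floordiv_eq_ediv_of_pos (by omega), PySem.Int.floordiv_eq_ediv_of_pos (by omega)]
  rcases abs_cases (a - b) with ⟨e1, f1⟩ | ⟨e1, f1⟩ <;>
    rcases abs_cases (a - i) with ⟨e2, f2⟩ | ⟨e2, f2⟩ <;>
    rcases abs_cases (b - i) with ⟨e3, f3⟩ | ⟨e3, f3⟩ <;> omega

lemma cov_intervals_iff (data : List ((Int × Int) × (Int × Int))) (sx bot sign i : Int)
    (hsign : sign = 1 ∨ sign = -1) :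
    pvCovI ((data.map pvCircle).foldl (fun acc c =>
        if |sign * (c.1 - sx) - (c.2.1 - bot)| ≤ c.2.2 then
          acc ++ [(PySem.Int.floordiv (sign * (c.1 - sx) + (c.2.1 - bot) - c.2.2 + 1) 2,
                   PySem.Int.floordiv (sign * (c.1 - sx) + (c.2.1 - bot) + c.2.2) 2)]
        else acc) []) i ↔
      pvCov data (sx + sign * i) (bot + i) = true := by
  rw [foldl_append_ite (fun c : Int × Int × Int => |sign * (c.1 - sx) - (c.2.1 - bot)| ≤ c.2.2)]
  rw [pvCov_iff]
  unfold pvCovI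
  simp only [List.nil_append, List.mem_map, List.mem_filter, decide_eq_true_eq, List.mem_map]
  constructor
  · rintro ⟨iv, ⟨c, ⟨⟨l, hl, rfl⟩, hle⟩, rfl⟩, h1, h2⟩
    refine ⟨l, hl, ?_⟩
    have := (interval_arith (sign * ((pvCircle l).1 - sx)) ((pvCircle l).2.1 - bot)
      ((pvCircle l).2.2) i).mp ⟨h1, h2, hle⟩
    simp only [pvCircle] at this ⊢
    rcases hsign with rfl | rfl
    · have e : |l.1.1 - (sx + 1 * i)| = |1 * (l.1.1 - sx) - i| := by ring_nf
      have e2 : |l.1.2 - (bot + i)| = |l.1.2 - bot - i| := by ring_nf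
      rw [e, e2]; exact this
    · have e : |l.1.1 - (sx + -1 * i)| = |-1 * (l.1.1 - sx) - i| := by
        rw [show l.1.1 - (sx + -1 * i) = -(-1 * (l.1.1 - sx) - i) by ring, abs_neg]
      have e2 : |l.1.2 - (bot + i)| = |l.1.2 - bot - i| := by ring_nf
      rw [e, e2]; exact this
  · rintro ⟨l, hl, hle⟩
    have hle' : |sign * ((pvCircle l).1 - sx) - i| + |((pvCircle l).2.1 - bot) - i| ≤
        (pvCircle l).2.2 := by
      simp only [pvCircle]
      rcases hsign with rfl | rfl
      · have e : |l.1.1 - (sx + 1 * i)| = |1 * (l.1.1 - sx) - i| := by ring_nf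
        have e2 : |l.1.2 - (bot + i)| = |l.1.2 - bot - i| := by ring_nf
        rw [e, e2] at hle; exact hle
      · have e : |l.1.1 - (sx + -1 * i)| = |-1 * (l.1.1 - sx) - i| := by
          rw [show l.1.1 - (sx + -1 * i) = -(-1 * (l.1.1 - sx) - i) by ring, abs_neg]
        have e2 : |l.1.2 - (bot + i)| = |l.1.2 - bot - i| := by ring_nf
        rw [e, e2] at hle; exact hle
    obtain ⟨g1, g2, g3⟩ := (interval_arith (sign * ((pvCircle l).1 - sx))
      ((pvCircle l).2.1 - bot) ((pvCircle l).2.2) i).mpr hle'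
    exact ⟨_, ⟨pvCircle l, ⟨⟨l, hl, rfl⟩, g3⟩, rfl⟩, g1, g2⟩

-- ===== scan characterization =====

lemma pvScan_none (data : List ((Int × Int) × (Int × Int))) (M sx bot : Int) :
    ∀ (a dist : Int),
      (∀ i, a ≤ i → i < dist →
        ¬(0 ≤ sx + i ∧ sx + i ≤ M ∧ 0 ≤ bot + i ∧ bot + i ≤ M ∧
            pvCov data (sx + i) (bot + i) = false) ∧
        ¬(0 ≤ sx - i ∧ sx - i ≤ M ∧ 0 ≤ bot + i ∧ bot + i ≤ M ∧
            pvCov data (sx - i) (bot + i) = false)) →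
      pvScan data M sx bot (PySem.List.pyRange a dist 1) = none := by
  intro a dist
  by_cases hlt : a < dist
  case neg =>
    intro _
    rw [PySem.List.pyRange_one_eq_nil (by omega)]
    rfl
  case pos =>
    have hn : (dist - a).toNat ≠ 0 := by omega
    generalize hk : (dist - a).toNat = k
    induction k generalizing a with
    | zero => omega
    | succ m ih =>
      intro hall
      rw [PySem.List.pyRange_one_cons hlt]
      obtain ⟨nr, nl⟩ := hall a (le_refl a) hlt
      simp only [pvScan, if_neg nr, if_neg nl]
      by_cases hlt' : a + 1 < dist
      · exact ih (a + 1) hlt' (by omega) (by omega)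
          (fun i h1 h2 => hall i (by omega) h2)
      · rw [PySem.List.pyRange_one_eq_nil (by omega)]
        rfl

lemma pvScan_some (data : List ((Int × Int) × (Int × Int))) (M sx bot : Int) :
    ∀ (a dist i : Int), a ≤ i → i < dist →
      (∀ k, a ≤ k → k < i →
        ¬(0 ≤ sx + k ∧ sx + k ≤ M ∧ 0 ≤ bot + k ∧ bot + k ≤ M ∧
            pvCov data (sx + k) (bot + k) = false) ∧
        ¬(0 ≤ sx - k ∧ sx - k ≤ M ∧ 0 ≤ bot + k ∧ bot + k ≤ M ∧
            pvCov data (sx - k) (bot + k) = false)) →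
      pvScan data M sx bot (PySem.List.pyRange a dist 1) =
        (if 0 ≤ sx + i ∧ sx + i ≤ M ∧ 0 ≤ bot + i ∧ bot + i ≤ M ∧
              pvCov data (sx + i) (bot + i) = false then
            some ((sx + i) * 4000000 + (bot + i))
          else if 0 ≤ sx - i ∧ sx - i ≤ M ∧ 0 ≤ bot + i ∧ bot + i ≤ M ∧
              pvCov data (sx - i) (bot + i) = false then
            some ((sx - i) * 4000000 + (bot + i))
          else pvScan data M sx bot (PySem.List.pyRange (i + 1) dist 1)) := by
  intro a dist i hai hid
  have hlt : a < dist := by omega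
  generalize hk : (i - a).toNat = k
  induction k generalizing a with
  | zero =>
    intro _
    have : a = i := by omega
    subst this
    rw [PySem.List.pyRange_one_cons hlt]
    simp only [pvScan]
  | succ m ih =>
    intro hall
    have hane : a ≠ i := by omega
    rw [PySem.List.pyRange_one_cons hlt]
    obtain ⟨nr, nl⟩ := hall a (le_refl a) (by omega)
    simp only [pvScan, if_neg nr, if_neg nl]
    exact ih (a + 1) (by omega) (by omega) (by omega) (fun k h1 h2 => hall k (by omega) h2)

-- ===== per-diagonal characterizations =====

-- the scan's right/left-candidate conditions
def pvCR (data : List ((Int × Int) × (Int × Int))) (M sx bot i : Int) : Prop :=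
  0 ≤ sx + i ∧ sx + i ≤ M ∧ 0 ≤ bot + i ∧ bot + i ≤ M ∧ pvCov data (sx + i) (bot + i) = false

def pvCL (data : List ((Int × Int) × (Int × Int))) (M sx bot i : Int) : Prop :=
  0 ≤ sx - i ∧ sx - i ≤ M ∧ 0 ≤ bot + i ∧ bot + i ≤ M ∧ pvCov data (sx - i) (bot + i) = false

lemma diagR_char (data : List ((Int × Int) × (Int × Int))) (M sx bot dist : Int) :
    (∀ iR, pvDiagGap (data.map pvCircle) M sx bot dist 1 = some iR →
      (0 ≤ iR ∧ iR < dist ∧ pvCR data M sx bot iR) ∧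
      ∀ k, k < iR → ¬(0 ≤ k ∧ k < dist ∧ pvCR data M sx bot k)) ∧
    (pvDiagGap (data.map pvCircle) M sx bot dist 1 = none →
      ∀ k, ¬(0 ≤ k ∧ k < dist ∧ pvCR data M sx bot k)) := by
  have hcov : ∀ i, pvCovI ((data.map pvCircle).foldl (fun acc c =>
      if |1 * (c.1 - sx) - (c.2.1 - bot)| ≤ c.2.2 then
        acc ++ [(PySem.Int.floordiv (1 * (c.1 - sx) + (c.2.1 - bot) - c.2.2 + 1) 2,
                 PySem.Int.floordiv (1 * (c.1 - sx) + (c.2.1 - bot) + c.2.2) 2)]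
      else acc) []) i ↔ pvCov data (sx + i) (bot + i) = true := by
    intro i
    have h := cov_intervals_iff data sx bot 1 i (Or.inl rfl)
    rw [show sx + 1 * i = sx + i by ring] at h
    exact h
  constructor
  · intro iR h
    simp only [pvDiagGap] at h
    simp only [if_true] at h
    obtain ⟨h1, h2, h3, h4⟩ := pvFirstGap_some _ _ _ _ h
    constructor
    · refine ⟨by omega, by omega, by omega, by omega, by omega, by omega, ?_⟩
      rw [Bool.eq_false_iff]
      intro hc
      exact h3 ((hcov iR).mpr hc)
    · rintro k hk ⟨k0, kd, b1, b2, b3, b4, kc⟩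
      by_cases hkS : max (max 0 (-sx)) (-bot) ≤ k
      · have := (hcov k).mp (h4 k hkS hk)
        rw [kc] at this
        exact Bool.noConfusion this
      · omega
  · intro h k
    simp only [pvDiagGap] at h
    simp only [if_true] at h
    rintro ⟨k0, kd, b1, b2, b3, b4, kc⟩
    have := (hcov k).mp (pvFirstGap_none _ _ _ h k (by omega) (by omega))
    rw [kc] at this
    exact Bool.noConfusion this

lemma diagL_char (data : List ((Int × Int) × (Int × Int))) (M sx bot dist : Int) :
    (∀ iL, pvDiagGap (data.map pvCircle) M sx bot dist (-1) = some iL →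
      (0 ≤ iL ∧ iL < dist ∧ pvCL data M sx bot iL) ∧
      ∀ k, k < iL → ¬(0 ≤ k ∧ k < dist ∧ pvCL data M sx bot k)) ∧
    (pvDiagGap (data.map pvCircle) M sx bot dist (-1) = none →
      ∀ k, ¬(0 ≤ k ∧ k < dist ∧ pvCL data M sx bot k)) := by
  have hcov : ∀ i, pvCovI ((data.map pvCircle).foldl (fun acc c =>
      if |(-1) * (c.1 - sx) - (c.2.1 - bot)| ≤ c.2.2 then
        acc ++ [(PySem.Int.floordiv ((-1) * (c.1 - sx) + (c.2.1 - bot) - c.2.2 + 1) 2,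
                 PySem.Int.floordiv ((-1) * (c.1 - sx) + (c.2.1 - bot) + c.2.2) 2)]
      else acc) []) i ↔ pvCov data (sx - i) (bot + i) = true := by
    intro i
    have h := cov_intervals_iff data sx bot (-1) i (Or.inr rfl)
    rw [show sx + (-1) * i = sx - i by ring] at h
    exact h
  constructor
  · intro iL h
    simp only [pvDiagGap] at h
    obtain ⟨h1, h2, h3, h4⟩ := pvFirstGap_some _ _ _ _ h
    constructor
    · refine ⟨by omega, by omega, by omega, by omega, by omega, by omega, ?_⟩
      rw [Bool.eq_false_iff]
      intro hc
      exact h3 ((hcov iL).mpr hc)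
    · rintro k hk ⟨k0, kd, b1, b2, b3, b4, kc⟩
      by_cases hkS : max (max 0 (sx - M)) (-bot) ≤ k
      · have := (hcov k).mp (h4 k hkS hk)
        rw [kc] at this
        exact Bool.noConfusion this
      · omega
  · intro h k
    simp only [pvDiagGap] at h
    rintro ⟨k0, kd, b1, b2, b3, b4, kc⟩
    have := (hcov k).mp (pvFirstGap_none _ _ _ h k (by omega) (by omega))
    rw [kc] at this
    exact Bool.noConfusion this

-- ===== the per-line equality =====

lemma line_eq (data : List ((Int × Int) × (Int × Int))) (M sx bot dist : Int) :
    pvScan data M sx bot (PySem.List.pyRange 0 dist 1) =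
      Option.map (fun b => b.2 * 4000000 + (bot + b.1)) (pvBest (data.map pvCircle) M sx bot dist) := by
  simp only [pvBest, List.foldl_cons, List.foldl_nil]
  cases hR : pvDiagGap (data.map pvCircle) M sx bot dist 1 with
  | none =>
    have hrnone := (diagR_char data M sx bot dist).2 hR
    cases hL : pvDiagGap (data.map pvCircle) M sx bot dist (-1) with
    | none =>
      have hlnone := (diagL_char data M sx bot dist).2 hL
      simp only [pvBestStep, hR, hL, Option.map_none]
      exact pvScan_none data M sx bot 0 dist (fun i h1 h2 =>
        ⟨fun c => hrnone i ⟨h1, h2, c⟩, fun c => hlnone i ⟨h1, h2, c⟩⟩)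
    | some iL =>
      obtain ⟨⟨l0, ld, lc⟩, lmin⟩ := (diagL_char data M sx bot dist).1 iL hL
      simp only [pvBestStep, hR, hL, Option.map_some]
      rw [pvScan_some data M sx bot 0 dist iL l0 ld (fun k hk1 hk2 =>
        ⟨fun c => hrnone k ⟨hk1, by omega, c⟩, fun c => lmin k hk2 ⟨hk1, by omega, c⟩⟩)]
      unfold pvCL at lc
      split_ifs with h1
      · exact absurd ⟨l0, ld, h1⟩ (hrnone iL)
      · congr 1; ring
  | some iR =>
    obtain ⟨⟨r0, rd, rc⟩, rmin⟩ := (diagR_char data M sx bot dist).1 iR hR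
    cases hL : pvDiagGap (data.map pvCircle) M sx bot dist (-1) with
    | none =>
      have hlnone := (diagL_char data M sx bot dist).2 hL
      simp only [pvBestStep, hR, hL, Option.map_some]
      rw [pvScan_some data M sx bot 0 dist iR r0 rd (fun k hk1 hk2 =>
        ⟨fun c => rmin k hk2 ⟨hk1, by omega, c⟩, fun c => hlnone k ⟨hk1, by omega, c⟩⟩)]
      unfold pvCR at rc
      split_ifs
      congr 1; ring
    | some iL =>
      obtain ⟨⟨l0, ld, lc⟩, lmin⟩ := (diagL_char data M sx bot dist).1 iL hL
      simp only [pvBestStep, hR, hL]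
      by_cases hcmp : iL < iR
      · rw [if_pos hcmp]
        simp only [Option.map_some]
        rw [pvScan_some data M sx bot 0 dist iL l0 ld (fun k hk1 hk2 =>
          ⟨fun c => rmin k (by omega) ⟨hk1, by omega, c⟩,
           fun c => lmin k hk2 ⟨hk1, by omega, c⟩⟩)]
        unfold pvCL at lc
        split_ifs with h1
        · exact absurd ⟨l0, ld, h1⟩ (rmin iL hcmp)
        · congr 1; ring
      · rw [if_neg hcmp]
        simp only [Option.map_some]
        rw [pvScan_some data M sx bot 0 dist iR r0 rd (fun k hk1 hk2 =>
          ⟨fun c => rmin k hk2 ⟨hk1, by omega, c⟩,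
           fun c => lmin k (by omega) ⟨hk1, by omega, c⟩⟩)]
        unfold pvCR at rc
        split_ifs
        congr 1; ring

lemma outer_eq (data : List ((Int × Int) × (Int × Int)))
    (S : PySem.Set ((Int × Int) × Int)) (B : PySem.Set (Int × Int))
    (hS : ∀ x y, pvFound S x y = pvCov data x y)
    (hB : ∀ p : Int × Int, PySem.Set.contains B p = true → pvCov data p.1 p.2 = true)
    (max_xy : Int) :
    ∀ L : List ((Int × Int) × (Int × Int)), (∀ l ∈ L, l ∈ data) →
      pvOuterA S B max_xy L = pvOuterB (data.map pvCircle) max_xy (L.map pvCircle) := by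
  intro L
  induction L with
  | nil => intro _; rfl
  | cons l rest ih =>
    intro hsub
    have hl : l ∈ data := hsub l (by simp)
    have hrest : ∀ x ∈ rest, x ∈ data := fun x hx => hsub x (by simp [hx])
    simp only [pvOuterA, List.map_cons, pvOuterB, pvCircle]
    rw [show |l.1.1 - l.2.1| + |l.1.2 - l.2.2| = pvDist l from rfl]
    rw [iloopA_eq_scan data S B hS hB max_xy l hl (PySem.List.pyRange 0 (pvDist l) 1)
      (fun i hi => by simpa using (PySem.List.mem_pyRange_one.mp hi))]
    rw [line_eq data max_xy l.1.1 (l.1.2 - pvDist l - 1) (pvDist l)]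
    rw [ih hrest]
    cases pvBest (data.map pvCircle) max_xy l.1.1 (l.1.2 - pvDist l - 1) (pvDist l) with
    | none => rfl
    | some b => rfl

-- ===== VERDICT (by name: the statement is the Claim_ definition above) =====
theorem compute_part2_spec : Claim_equal_compute_part2 := by
  intro data max_xy _
  unfold Spec_compute_part2 compute_part2 compute_part2_alt
  obtain ⟨hSmem, hBmem⟩ := pvSets_spec data
  apply outer_eq data _ _ ?_ ?_ max_xy data (fun _ h => h)
  · intro x y
    rw [Bool.eq_iff_iff, pvFound_iff, pvCov_iff]
    constructor
    · rintro ⟨sd, hsd, hle⟩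
      obtain ⟨l, hl, rfl⟩ := (hSmem sd).mp hsd
      exact ⟨l, hl, hle⟩
    · rintro ⟨l, hl, hle⟩
      exact ⟨(l.1, pvDist l), (hSmem _).mpr ⟨l, hl, rfl⟩, hle⟩
  · intro p hp
    rw [PySem.Set.contains_iff] at hp
    obtain ⟨l, hl, rfl⟩ := (hBmem p).mp hp
    rw [pvCov_iff]
    exact ⟨l, hl, by simp [pvDist]⟩
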